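-- pv_equiv track=rewrite | github.com/Heightsdesign/stockwatch | stockwatch/alerts/tasks.py | get_valid_period
-- ===== SOURCE A (Python) =====
-- def get_valid_period(required_days):
--     """
--     Maps the required number of days to the closest valid yfinance period that meets or exceeds the required days.
--
--     Args:
--         required_days (int): The number of days required for the indicator calculation.
--
--     Returns:
--         str: A valid yfinance period string.
--     """
--     # Define valid yfinance periods with their approximate day equivalents
--     period_days = [
--         ('1d', 1),
--         ('5d', 5),
--         ('1mo', 30),
--         ('3mo', 90),
--         ('6mo', 180),
--         ('1y', 365),
--         ('2y', 730),
--         ('5y', 1825),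
--         ('10y', 3650),
--         ('ytd', None),  # Special case: Year-to-date
--         ('max', None)    # Special case: Maximum available data
--     ]
--
--     for period, days in period_days:
--         if days and days >= required_days:
--             return period
--     # If required_days exceed the largest defined period, return 'max'
--     return 'max'
-- ===== SOURCE B (Python) =====
-- import bisect
--
-- _THRESHOLDS = [1, 5, 30, 90, 180, 365, 730, 1825, 3650]
-- _PERIODS = ['1d', '5d', '1mo', '3mo', '6mo', '1y', '2y', '5y', '10y']
--
-- def get_valid_period(required_days):
--     """Binary-search the sorted day thresholds for the leftmost period covering required_days."""
--     i = bisect.bisect_left(_THRESHOLDS, required_days)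
--     return _PERIODS[i] if i < len(_PERIODS) else 'max'
-- ===== Notes on version B (the rewrite author's own statement) =====
-- stated objective: idiomatic
-- what changed: Replaces the linear scan over (period, days) pairs (with None sentinels filtered by truthiness) by a bisect_left binary search on a sorted threshold array with a parallel periods list and a 'max' fallback.
import Mathlib
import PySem

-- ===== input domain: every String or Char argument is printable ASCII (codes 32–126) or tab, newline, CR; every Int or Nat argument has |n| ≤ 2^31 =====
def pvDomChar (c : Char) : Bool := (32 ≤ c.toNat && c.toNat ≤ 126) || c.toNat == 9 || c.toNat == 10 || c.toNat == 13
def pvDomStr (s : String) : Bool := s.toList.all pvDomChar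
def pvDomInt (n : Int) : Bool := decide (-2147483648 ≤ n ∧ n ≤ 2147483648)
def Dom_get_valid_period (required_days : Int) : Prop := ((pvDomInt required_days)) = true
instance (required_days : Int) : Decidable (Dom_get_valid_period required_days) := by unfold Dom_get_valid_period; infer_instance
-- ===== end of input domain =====

set_option maxHeartbeats 1000000
set_option maxRecDepth 8000


-- B replaces A's linear scan over (period, days) pairs by bisect_left on a sorted
-- threshold array with a parallel periods list (idiomatic; return value only).

-- ===== PORT A =====
-- the period_days table, None → Option.none
def pvPeriodDays : List (String × Option Int) :=
  [("1d", some 1), ("5d", some 5), ("1mo", some 30), ("3mo", some 90),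
   ("6mo", some 180), ("1y", some 365), ("2y", some 730), ("5y", some 1825),
   ("10y", some 3650), ("ytd", none), ("max", none)]

-- the for-loop with early return; 'days and days >= required_days' = days truthy (not None, not 0) and ≥
def pvLoopA (rd : Int) : List (String × Option Int) → Option String
  | [] => none
  | (period, days) :: rest =>
      match days with
      | some d => if d ≠ 0 ∧ d ≥ rd then some period else pvLoopA rd rest
      | none => pvLoopA rd rest

def get_valid_period (required_days : Int) : String :=
  (pvLoopA required_days pvPeriodDays).getD "max"

-- ===== PORT B =====
def pvThresholds : List Int := [1, 5, 30, 90, 180, 365, 730, 1825, 3650]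
def pvPeriods : List String := ["1d", "5d", "1mo", "3mo", "6mo", "1y", "2y", "5y", "10y"]

-- bisect.bisect_left: binary search for the leftmost index with xs[i] ≥ x
def pvBisectLeft (xs : List Int) (x : Int) (lo hi : Nat) : Nat :=
  if _h : lo < hi then
    if xs.getD ((lo + hi) / 2) 0 < x then pvBisectLeft xs x ((lo + hi) / 2 + 1) hi
    else pvBisectLeft xs x lo ((lo + hi) / 2)
  else lo
termination_by hi - lo
decreasing_by all_goals omega

def get_valid_period_alt (required_days : Int) : String :=
  let i := pvBisectLeft pvThresholds required_days 0 pvThresholds.length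
  if i < pvPeriods.length then pvPeriods.getD i "max" else "max"

-- ===== PRECONDITION & SPEC =====
def Spec_get_valid_period (required_days : Int) (out : String) : Prop := out = get_valid_period_alt required_days
instance (required_days : Int) (out : String) : Decidable (Spec_get_valid_period required_days out) := by unfold Spec_get_valid_period; infer_instance

-- ===== CLAIM (what is proved, stated in full; the proofs are below) =====
def Claim_equal_get_valid_period : Prop := ∀ (required_days : Int), Dom_get_valid_period required_days → Spec_get_valid_period required_days (get_valid_period required_days)

-- ===== LEMMAS AND PROOFS =====

-- A's linear scan, evaluated into a chain of comparisons
theorem pvA_eval (n : Int) :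
    get_valid_period n =
      if 1 ≥ n then "1d" else if 5 ≥ n then "5d" else if 30 ≥ n then "1mo"
      else if 90 ≥ n then "3mo" else if 180 ≥ n then "6mo" else if 365 ≥ n then "1y"
      else if 730 ≥ n then "2y" else if 1825 ≥ n then "5y" else if 3650 ≥ n then "10y"
      else "max" := by
  simp only [get_valid_period, pvPeriodDays, pvLoopA]
  norm_num
  split_ifs <;> simp

-- B's binary search, evaluated into the same chain of comparisons

theorem pvBL_leaf (xs : List Int) (x : Int) (a : Nat) : pvBisectLeft xs x a a = a := by
  rw [pvBisectLeft.eq_def]; simp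

theorem pvBL_89 (x : Int) : pvBisectLeft pvThresholds x 8 9 =
    if 3650 < x then (9:Nat) else 8 := by
  have hm : pvThresholds[((8 + 9) / 2)]?.getD 0 = (3650 : Int) := by decide
  rw [pvBisectLeft.eq_def]
  norm_num [hm, pvBL_leaf]

theorem pvBL_56 (x : Int) : pvBisectLeft pvThresholds x 5 6 =
    if 365 < x then (6:Nat) else 5 := by
  have hm : pvThresholds[((5 + 6) / 2)]?.getD 0 = (365 : Int) := by decide
  rw [pvBisectLeft.eq_def]
  norm_num [hm, pvBL_leaf]

theorem pvBL_57 (x : Int) : pvBisectLeft pvThresholds x 5 7 =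
    if 730 < x then (7:Nat) else if 365 < x then 6 else 5 := by
  have hm : pvThresholds[((5 + 7) / 2)]?.getD 0 = (730 : Int) := by decide
  rw [pvBisectLeft.eq_def]
  norm_num [hm, pvBL_leaf, pvBL_56]

theorem pvBL_59 (x : Int) : pvBisectLeft pvThresholds x 5 9 =
    if 1825 < x then (if 3650 < x then 9 else 8 : Nat) else if 730 < x then 7 else if 365 < x then 6 else 5 := by
  have hm : pvThresholds[((5 + 9) / 2)]?.getD 0 = (1825 : Int) := by decide
  rw [pvBisectLeft.eq_def]
  norm_num [hm, pvBL_89, pvBL_57]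

theorem pvBL_34 (x : Int) : pvBisectLeft pvThresholds x 3 4 =
    if 90 < x then (4:Nat) else 3 := by
  have hm : pvThresholds[((3 + 4) / 2)]?.getD 0 = (90 : Int) := by decide
  rw [pvBisectLeft.eq_def]
  norm_num [hm, pvBL_leaf]

theorem pvBL_01 (x : Int) : pvBisectLeft pvThresholds x 0 1 =
    if 1 < x then (1:Nat) else 0 := by
  have hm : pvThresholds[((0 + 1) / 2)]?.getD 0 = (1 : Int) := by decide
  rw [pvBisectLeft.eq_def]
  norm_num [hm, pvBL_leaf]

theorem pvBL_02 (x : Int) : pvBisectLeft pvThresholds x 0 2 =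
    if 5 < x then (2:Nat) else if 1 < x then 1 else 0 := by
  have hm : pvThresholds[((0 + 2) / 2)]?.getD 0 = (5 : Int) := by decide
  rw [pvBisectLeft.eq_def]
  norm_num [hm, pvBL_leaf, pvBL_01]

theorem pvBL_04 (x : Int) : pvBisectLeft pvThresholds x 0 4 =
    if 30 < x then (if 90 < x then 4 else 3 : Nat) else if 5 < x then 2 else if 1 < x then 1 else 0 := by
  have hm : pvThresholds[((0 + 4) / 2)]?.getD 0 = (30 : Int) := by decide
  rw [pvBisectLeft.eq_def]
  norm_num [hm, pvBL_34, pvBL_02]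

theorem pvBL_09 (x : Int) : pvBisectLeft pvThresholds x 0 9 =
    if 180 < x then (if 1825 < x then (if 3650 < x then 9 else 8) else if 730 < x then 7 else if 365 < x then 6 else 5 : Nat) else if 30 < x then (if 90 < x then 4 else 3) else if 5 < x then 2 else if 1 < x then 1 else 0 := by
  have hm : pvThresholds[((0 + 9) / 2)]?.getD 0 = (180 : Int) := by decide
  rw [pvBisectLeft.eq_def]
  norm_num [hm, pvBL_59, pvBL_04]

theorem pvB_eval (n : Int) :
    get_valid_period_alt n =
      if 1 ≥ n then "1d" else if 5 ≥ n then "5d" else if 30 ≥ n then "1mo"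
      else if 90 ≥ n then "3mo" else if 180 ≥ n then "6mo" else if 365 ≥ n then "1y"
      else if 730 ≥ n then "2y" else if 1825 ≥ n then "5y" else if 3650 ≥ n then "10y"
      else "max" := by
  unfold get_valid_period_alt
  rw [show pvThresholds.length = 9 from rfl, pvBL_09]
  by_cases h1 : 1 < n <;> by_cases h5 : 5 < n <;> by_cases h30 : 30 < n <;>
    by_cases h90 : 90 < n <;> by_cases h180 : 180 < n <;> by_cases h365 : 365 < n <;>
    by_cases h730 : 730 < n <;> by_cases h1825 : 1825 < n <;> by_cases h3650 : 3650 < n <;>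
    first
      | omega
      | (simp only [if_pos, h1, h5, h30, h90, h180, h365, h730, h1825, h3650, ite_false]
         norm_num [pvPeriods]
         split_ifs <;> first | rfl | omega)

-- ===== VERDICT (by name: the statement is the Claim_ definition above) =====
theorem get_valid_period_spec : Claim_equal_get_valid_period := by
  intro n _
  unfold Spec_get_valid_period
  rw [pvA_eval, pvB_eval]
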